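-- pv_equiv track=rewrite | github.com/hawkjo/bcwithqc | bcwithqc/bc_parser.py | _candidate_boundary_shifts
-- ===== SOURCE A (Python) =====
-- import itertools
--
-- def _candidate_boundary_shifts(blocks, raw_bounds, seq_len):
--     """
--     Generate nearby boundary candidates for barcode rescue.
--
--     The initial aligner can place block boundaries one base too early/late when an
--     indel occurs in a wildcard block.  We therefore try small shifts around each
--     inferred boundary, using the maxerrors of the adjacent blocks to limit the
--     search space.  The unshifted boundaries are yielded first.
--     """
--     raw_bounds = [int(b) for b in raw_bounds]
--
--     if not raw_bounds:
--         return
--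
--     # Always try the original segmentation first.
--     seen = {tuple(raw_bounds)}
--     yield raw_bounds
--
--     windows = []
--     for i in range(len(raw_bounds)):
--         left_err = blocks[i].get("maxerrors", 0) if i < len(blocks) else 0
--         right_err = blocks[i + 1].get("maxerrors", 0) if i + 1 < len(blocks) else 0
--         # One-base shifts catch the common case even for random/UMI blocks where
--         # maxerrors can be 0.  The cap prevents combinatorial explosions for more
--         # complex barcode structures.
--         window = max(1, left_err, right_err)
--         window = min(window, 2)
--         windows.append(range(-window, window + 1))
--
--     candidates = []
--     for shifts in itertools.product(*windows):
--         if all(shift == 0 for shift in shifts):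
--             continue
--
--         bounds = [bound + shift for bound, shift in zip(raw_bounds, shifts)]
--         bounds_tup = tuple(bounds)
--         if bounds_tup in seen:
--             continue
--         seen.add(bounds_tup)
--
--         if bounds[0] < 0 or bounds[-1] > seq_len:
--             continue
--         if any(left > right for left, right in zip(bounds, bounds[1:])):
--             continue
--
--         # Prefer minimal rescue shifts, then deterministic left-to-right order.
--         candidates.append((sum(abs(s) for s in shifts), shifts, bounds))
--
--     for _, _, bounds in sorted(candidates):
--         yield bounds
-- ===== SOURCE B (Python) =====
-- def _candidate_boundary_shifts(blocks, raw_bounds, seq_len):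
--     """Same candidates as A, but built by a pruned depth-first search over the
--     shift tree (one boundary at a time) instead of filtering the full
--     Cartesian product of shift windows."""
--     raw_bounds = [int(b) for b in raw_bounds]
--     if not raw_bounds:
--         return
--     yield raw_bounds
--
--     def window(i):
--         left_err = blocks[i].get("maxerrors", 0) if i < len(blocks) else 0
--         right_err = blocks[i + 1].get("maxerrors", 0) if i + 1 < len(blocks) else 0
--         w = min(max(1, left_err, right_err), 2)
--         return range(-w, w + 1)
--
--     pairs = [(b, window(i)) for i, b in enumerate(raw_bounds)]
--     out = []
--
--     def extend(rem, prev, shifts, bounds):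
--         if not rem:
--             if any(s != 0 for s in shifts):
--                 out.append((sum(abs(s) for s in shifts), shifts, bounds))
--             return
--         (raw, win), rest = rem[0], rem[1:]
--         for s in win:
--             b = raw + s
--             if prev is None:
--                 if b < 0:
--                     continue  # first boundary negative: prune subtree
--             elif prev > b:
--                 continue      # monotonicity broken: prune subtree
--             if not rest and b > seq_len:
--                 continue      # last boundary past the sequence end
--             extend(rest, b, shifts + (s,), bounds + [b])
--
--     extend(pairs, None, (), [])
--     for _, _, bounds in sorted(out):
--         yield bounds
-- ===== Notes on version B (the rewrite author's own statement) =====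
-- stated objective: alternative
-- what changed: B replaces A's materialisation of the full Cartesian product of per-boundary shift windows followed by per-candidate filtering and a seen-set with a recursive depth-first search that extends one boundary at a time and prunes whole subtrees as soon as the first boundary is negative, monotonicity breaks, or the last boundary exceeds seq_len, collecting only valid full-length candidates before the same (total-shift, shifts) sort.
import Mathlib
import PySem

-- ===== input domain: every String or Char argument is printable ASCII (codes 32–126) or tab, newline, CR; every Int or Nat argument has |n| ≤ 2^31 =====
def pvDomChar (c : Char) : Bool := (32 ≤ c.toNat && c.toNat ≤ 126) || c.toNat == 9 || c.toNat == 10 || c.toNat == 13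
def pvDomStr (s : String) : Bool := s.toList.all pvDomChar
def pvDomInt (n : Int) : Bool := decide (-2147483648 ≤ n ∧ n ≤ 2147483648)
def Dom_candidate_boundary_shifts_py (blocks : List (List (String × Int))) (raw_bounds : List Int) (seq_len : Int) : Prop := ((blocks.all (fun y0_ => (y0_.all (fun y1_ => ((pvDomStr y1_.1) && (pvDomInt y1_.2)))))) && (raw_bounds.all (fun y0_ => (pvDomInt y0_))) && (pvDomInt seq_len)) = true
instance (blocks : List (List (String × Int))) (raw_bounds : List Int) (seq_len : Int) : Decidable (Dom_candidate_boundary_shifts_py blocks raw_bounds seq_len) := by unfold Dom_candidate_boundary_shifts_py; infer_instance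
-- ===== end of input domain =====

-- B replaces A's materialise-the-whole-Cartesian-product-then-filter loop by a pruned
-- depth-first search that extends one boundary at a time (objective: alternative).
-- Both Pythons are generators; they are ported as the list of yielded values.

-- ===== PORT A =====

-- helper shared by both Pythons verbatim: the per-boundary shift window
-- (left_err/right_err from the adjacent blocks' "maxerrors", window capped to [1,2])
def pvWindow (blocks : List (List (String × Int))) (i : Nat) : List Int :=
  let left_err : Int := if i < blocks.length then PySem.Dict.getD (PySem.Dict.ofList (blocks.getD i [])) "maxerrors" 0 else 0
  let right_err : Int := if i + 1 < blocks.length then PySem.Dict.getD (PySem.Dict.ofList (blocks.getD (i + 1) [])) "maxerrors" 0 else 0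
  let window : Int := min (max (max 1 left_err) right_err) 2
  PySem.List.pyRange (-window) (window + 1) 1

-- itertools.product(*windows), in itertools' lexicographic order
def pvProduct : List (List Int) → List (List Int)
  | [] => [[]]
  | w :: ws => w.flatMap (fun s => (pvProduct ws).map (fun rest => s :: rest))

-- the body of A's `for shifts in itertools.product(*windows)` loop; state = (seen, candidates)
def pvStepA (seq_len : Int) (raw_bounds : List Int)
    (st : PySem.Set (List Int) × List (Int × List Int × List Int)) (shifts : List Int) :
    PySem.Set (List Int) × List (Int × List Int × List Int) :=
  if shifts.all (fun s => s == 0) then st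
  else
    let bounds := List.zipWith (fun b s => b + s) raw_bounds shifts
    if PySem.Set.contains st.1 bounds then st
    else
      let seen := PySem.Set.add st.1 bounds
      if PySem.List.pyGetD bounds 0 0 < 0 ∨ PySem.List.pyGetD bounds (-1) 0 > seq_len then (seen, st.2)
      else if (bounds.zip bounds.tail).any (fun lr => lr.1 > lr.2) then (seen, st.2)
      else (seen, st.2 ++ [((shifts.map (fun s => |s|)).sum, shifts, bounds)])

def candidate_boundary_shifts_py (blocks : List (List (String × Int))) (raw_bounds : List Int) (seq_len : Int) : List (List Int) :=
  -- raw_bounds = [int(b) for b in raw_bounds] is the identity on ints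
  match raw_bounds with
  | [] => []
  | _ :: _ =>
    let seen : PySem.Set (List Int) := PySem.Set.add PySem.Set.empty raw_bounds
    let windows := (List.range raw_bounds.length).map (fun i => pvWindow blocks i)
    let res := (pvProduct windows).foldl (pvStepA seq_len raw_bounds) (seen, [])
    -- sorted(candidates): Python orders the (sum, shifts, bounds) triples lexicographically;
    -- the shifts components are pairwise distinct, so the third component never decides
    raw_bounds :: (PySem.List.sorted2 res.2 (fun t => t.1) (fun t => t.2.1)).map (fun t => t.2.2)

-- ===== PORT B =====

-- B's recursive `extend`: depth-first over the remaining (raw bound, window) pairs,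
-- pruning whole subtrees at the first failing check
def pvDfs (seq_len : Int) (rem : List (Int × List Int)) (prev : Option Int)
    (shifts : List Int) (bounds : List Int) : List (Int × List Int × List Int) :=
  match rem with
  | [] =>
    if shifts.any (fun s => s != 0) then [((shifts.map (fun s => |s|)).sum, shifts, bounds)] else []
  | (raw, win) :: rest =>
    win.flatMap (fun s =>
      let b := raw + s
      if (match prev with | none => decide (b < 0) | some p => decide (p > b)) then []
      else if rest.isEmpty && b > seq_len then []
      else pvDfs seq_len rest (some b) (shifts ++ [s]) (bounds ++ [b]))

def candidate_boundary_shifts_py_alt (blocks : List (List (String × Int))) (raw_bounds : List Int) (seq_len : Int) : List (List Int) :=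
  match raw_bounds with
  | [] => []
  | _ :: _ =>
    let pairs := raw_bounds.zipIdx.map (fun bi => (bi.1, pvWindow blocks bi.2))
    let out := pvDfs seq_len pairs none [] []
    -- sorted(out): same triple order as in A's port (shifts pairwise distinct)
    raw_bounds :: (PySem.List.sorted2 out (fun t => t.1) (fun t => t.2.1)).map (fun t => t.2.2)

-- ===== PRECONDITION & SPEC =====
def Spec_candidate_boundary_shifts_py (blocks : List (List (String × Int))) (raw_bounds : List Int) (seq_len : Int) (out : List (List Int)) : Prop := out = candidate_boundary_shifts_py_alt blocks raw_bounds seq_len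
instance (blocks : List (List (String × Int))) (raw_bounds : List Int) (seq_len : Int) (out : List (List Int)) : Decidable (Spec_candidate_boundary_shifts_py blocks raw_bounds seq_len out) := by unfold Spec_candidate_boundary_shifts_py; infer_instance

-- ===== CLAIM (what is proved, stated in full; the proofs are below) =====
def Claim_equal_candidate_boundary_shifts_py : Prop := ∀ (blocks : List (List (String × Int))) (raw_bounds : List Int) (seq_len : Int), Dom_candidate_boundary_shifts_py blocks raw_bounds seq_len → Spec_candidate_boundary_shifts_py blocks raw_bounds seq_len (candidate_boundary_shifts_py blocks raw_bounds seq_len)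

-- ===== LEMMAS AND PROOFS =====

def pvZB (raw s : List Int) : List Int := List.zipWith (fun b s => b + s) raw s

theorem pv_any_ne : ∀ l : List Int, (l.any (fun s => s != 0)) = !(l.all (fun s => s == 0)) := by
  intro l; induction l with
  | nil => rfl
  | cons a t ih => rw [List.any_cons, List.all_cons, ih, Bool.not_and]; simp [bne]

theorem pv_zb_eq_self_iff (raw : List Int) : ∀ s : List Int, s.length = raw.length →
    (pvZB raw s = raw ↔ (s.all (fun x => x == 0)) = true) := by
  induction raw with
  | nil => intro s h; simp [pvZB]; cases s <;> simp_all
  | cons b bs ih =>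
    intro s h; cases s with
    | nil => simp at h
    | cons a t =>
      simp only [pvZB, List.zipWith, List.cons.injEq, List.all_cons, Bool.and_eq_true,
        beq_iff_eq, List.length_cons, Nat.add_right_cancel_iff] at h ⊢
      rw [show List.zipWith (fun b s => b + s) bs t = pvZB bs t from rfl, ih t h]
      constructor
      · rintro ⟨h1, h2⟩; exact ⟨by omega, h2⟩
      · rintro ⟨h1, h2⟩; exact ⟨by omega, h2⟩

theorem pv_zb_inj (raw : List Int) : ∀ s t : List Int, s.length = raw.length → t.length = raw.length →
    pvZB raw s = pvZB raw t → s = t := by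
  induction raw with
  | nil => intro s t hs ht _; cases s <;> cases t <;> simp_all
  | cons b bs ih =>
    intro s t hs ht h
    cases s with | nil => simp at hs | cons a s' =>
    cases t with | nil => simp at ht | cons c t' =>
    simp [pvZB] at h hs ht ⊢
    exact ⟨by omega, ih s' t' hs ht h.2⟩

def pvOkA (seq_len : Int) (bounds : List Int) : Bool :=
  !(decide (PySem.List.pyGetD bounds 0 0 < 0 ∨ PySem.List.pyGetD bounds (-1) 0 > seq_len)) &&
  !((bounds.zip bounds.tail).any (fun lr => lr.1 > lr.2))

def pvChain (seq_len : Int) : Option Int → List Int → Bool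
  | _, [] => true
  | prev, b :: bs =>
    (match prev with | none => !decide (b < 0) | some p => !decide (p > b)) &&
    (!bs.isEmpty || !decide (b > seq_len)) && pvChain seq_len (some b) bs

def pvMono : Int → List Int → Bool
  | _, [] => true
  | p, b :: bs => !decide (p > b) && pvMono b bs

theorem pv_prod_len : ∀ (ws : List (List Int)) (s : List Int), s ∈ pvProduct ws → s.length = ws.length := by
  intro ws; induction ws with
  | nil => intro s hs; simp [pvProduct] at hs; simp [hs]
  | cons w ws ih =>
    intro s hs
    simp only [pvProduct, List.mem_flatMap, List.mem_map] at hs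
    obtain ⟨a, _, rest, hrest, rfl⟩ := hs
    simp [ih rest hrest]

theorem pv_prod_nodup : ∀ ws : List (List Int), (∀ w ∈ ws, w.Nodup) → (pvProduct ws).Nodup := by
  intro ws; induction ws with
  | nil => intro _; simp [pvProduct]
  | cons w ws ih =>
    intro h
    have hw : w.Nodup := h w (by simp)
    have hrest : (pvProduct ws).Nodup := ih (fun x hx => h x (by simp [hx]))
    simp only [pvProduct]
    clear ih h
    induction w with
    | nil => simp
    | cons a t iht =>
      simp only [List.flatMap_cons]
      have hw' : a ∉ t ∧ t.Nodup := by simpa using hw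
      refine List.Nodup.append (hrest.map ?_) (iht hw'.2) ?_
      · intro x y hxy; simpa using hxy
      · intro z hz hz2
        simp only [List.mem_map] at hz
        simp only [List.mem_flatMap, List.mem_map] at hz2
        obtain ⟨r, hr, rfl⟩ := hz
        obtain ⟨a', ha', r', hr', heq⟩ := hz2
        have : a = a' := ((List.cons.injEq _ _ _ _).mp heq.symm).1
        exact hw'.1 (this ▸ ha')

theorem pv_mono_zip : ∀ (bs : List Int) (b : Int),
    (!((b :: bs).zip bs).any (fun lr => lr.1 > lr.2)) = pvMono b bs := by
  intro bs; induction bs with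
  | nil => intro b; rfl
  | cons c cs ih => intro b; simp [pvMono, ← ih c, Bool.not_or]

theorem pv_chain_some (seq_len : Int) : ∀ (l : List Int) (p : Int),
    pvChain seq_len (some p) l = (pvMono p l && (l.isEmpty || !decide (l.getLastD p > seq_len))) := by
  intro l; induction l with
  | nil => intro p; simp [pvChain, pvMono]
  | cons b bs ih =>
    intro p
    rw [pvChain, ih b]
    cases bs with
    | nil => simp [pvMono]
    | cons c cs =>
      rcases hlast : (c :: cs).getLast? with _ | x
      · simp at hlast
      · simp [pvMono, hlast, List.getLastD_eq_getLast?, Bool.and_assoc, Bool.and_left_comm]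

theorem pv_chain_none (seq_len : Int) (b : Int) (bs : List Int) :
    pvChain seq_len none (b :: bs) = pvOkA seq_len (b :: bs) := by
  rw [pvChain, pv_chain_some, pvOkA, ← pv_mono_zip]
  have h1 : PySem.List.pyGetD (b :: bs) 0 0 = b := by simp [pysem]
  have h2 : ∀ (bs : List Int) (b : Int), PySem.List.pyGetD (b :: bs) (-1) 0 = bs.getLastD b := by
    intro bs; induction bs with
    | nil => intro b; rw [PySem.List.pyGetD_neg_one (xs := [b]) (h := by simp)]; rfl
    | cons c cs ih =>
      intro b
      rw [PySem.List.pyGetD_neg_one (xs := b :: c :: cs) (h := by simp),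
        List.getLast_cons (by simp), ← PySem.List.pyGetD_neg_one (xs := c :: cs), ih c,
        List.getLastD_cons]
  rw [h1, h2]
  cases bs with
  | nil =>
    simp only [Bool.decide_or, Bool.not_or, List.getLastD_nil, pvMono, List.isEmpty_nil]
    cases decide (b < 0) <;> cases decide (b > seq_len) <;> simp
  | cons c cs =>
    simp only [Bool.decide_or, Bool.not_or, List.getLastD_cons, List.isEmpty_cons, Bool.false_or]
    cases decide (b < 0) <;> cases hx : decide ((c :: cs).getLastD b > seq_len) <;>
      cases hm : pvMono b (c :: cs) <;>
      simp_all [List.getLastD_cons, Bool.and_comm, Bool.and_assoc, Bool.and_left_comm]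

theorem pv_pairs_fst (raw : List Int) (f : Nat → List Int) :
    (raw.zipIdx.map (fun bi => (bi.1, f bi.2))).map (fun q => q.1) = raw := by
  simp [List.map_map, Function.comp_def]

theorem pv_pairs_snd (raw : List Int) (f : Nat → List Int) :
    (raw.zipIdx.map (fun bi => (bi.1, f bi.2))).map (fun q => q.2) = (List.range raw.length).map f := by
  rw [List.map_map,
    show ((fun q : Int × List Int => q.2) ∘ (fun bi : Int × Nat => (bi.1, f bi.2))) = f ∘ Prod.snd from rfl,
    ← List.map_map, List.zipIdx_map_snd, List.range_eq_range']

def pvTri (raw : List Int) (s : List Int) : Int × List Int × List Int :=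
  ((s.map (fun x => |x|)).sum, s, pvZB raw s)

theorem pv_foldA_spec (seq_len : Int) (raw : List Int) : ∀ (L : List (List Int))
    (seen : PySem.Set (List Int)) (acc : List (Int × List Int × List Int)),
    (∀ s ∈ L, (s.all (fun x => x == 0)) = false → pvZB raw s ∉ seen) →
    ((L.map (pvZB raw)).Nodup) →
    (L.foldl (pvStepA seq_len raw) (seen, acc)).2 =
      acc ++ (L.filter (fun s => !(s.all (fun x => x == 0)) && pvOkA seq_len (pvZB raw s))).map (pvTri raw) := by
  intro L
  induction L with
  | nil => intro seen acc _ _; simp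
  | cons s L ih =>
    intro seen acc h2 h3
    simp only [List.map_cons, List.nodup_cons] at h3
    rcases hz : s.all (fun x => x == 0) with _ | _
    · -- s is not all zero
      have hnotin : pvZB raw s ∉ seen := h2 s (by simp) hz
      have hcont : PySem.Set.contains seen (pvZB raw s) = false := by
        simp [PySem.Set.contains_eq_listContains, List.contains_eq_mem, hnotin]
      have hadd : PySem.Set.add seen (pvZB raw s) = seen ++ [pvZB raw s] :=
        PySem.Set.add_of_not_mem hnotin
      have hstep : pvStepA seq_len raw (seen, acc) s =
          (seen ++ [pvZB raw s],
            acc ++ if pvOkA seq_len (pvZB raw s) then [pvTri raw s] else []) := by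
        rw [pvStepA]
        simp only [hz, Bool.false_eq_true, if_false]
        rw [show List.zipWith (fun b s => b + s) raw s = pvZB raw s from rfl]
        simp only [hcont, Bool.false_eq_true, if_false, hadd]
        by_cases hb : PySem.List.pyGetD (pvZB raw s) 0 0 < 0 ∨ PySem.List.pyGetD (pvZB raw s) (-1) 0 > seq_len
        · simp [hb, pvOkA, List.append_nil]
        · rcases hm : ((pvZB raw s).zip (pvZB raw s).tail).any (fun lr => lr.1 > lr.2) with _ | _
          · simp [hb, hm, pvOkA, pvTri]
          · simp [hb, hm, pvOkA]
      have h2' : ∀ t ∈ L, (t.all (fun x => x == 0)) = false → pvZB raw t ∉ seen ++ [pvZB raw s] := by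
        intro t ht htz
        simp only [List.mem_append, List.mem_singleton]
        rintro (hin | heq)
        · exact h2 t (by simp [ht]) htz hin
        · exact h3.1 (heq ▸ List.mem_map_of_mem ht)
      rw [List.foldl_cons, hstep, ih _ _ h2' h3.2]
      rcases ho : pvOkA seq_len (pvZB raw s) with _ | _
      · simp [List.filter_cons, hz, ho]
      · simp [List.filter_cons, hz, ho]
    · -- all-zero shifts: skipped
      have hstep : pvStepA seq_len raw (seen, acc) s = (seen, acc) := by
        rw [pvStepA]; simp [hz]
      rw [List.foldl_cons, hstep, ih _ _ (fun t ht => h2 t (by simp [ht])) h3.2]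
      simp [List.filter_cons, hz]

theorem pvChain_cons (seq_len : Int) (prev : Option Int) (b : Int) (bs : List Int) :
    pvChain seq_len prev (b :: bs) =
      ((match prev with | none => !decide (b < 0) | some p => !decide (p > b)) &&
       (!bs.isEmpty || !decide (b > seq_len)) && pvChain seq_len (some b) bs) := by
  cases prev <;> rfl

theorem pv_dfs_spec (seq_len : Int) : ∀ (ps : List (Int × List Int)) (prev : Option Int)
    (sh0 b0 : List Int),
    pvDfs seq_len ps prev sh0 b0 =
      ((pvProduct (ps.map (fun q => q.2))).filter
        (fun s => pvChain seq_len prev (pvZB (ps.map (fun q => q.1)) s) && !((sh0 ++ s).all (fun x => x == 0)))).map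
      (fun s => (((sh0 ++ s).map (fun x => |x|)).sum, sh0 ++ s, b0 ++ pvZB (ps.map (fun q => q.1)) s)) := by
  intro ps
  induction ps with
  | nil =>
    intro prev sh0 b0
    simp only [List.map_nil, pvProduct, pvDfs, pvZB, List.zipWith_nil_left, pvChain,
      List.append_nil, Bool.true_and, List.filter_cons, List.filter_nil]
    rw [pv_any_ne]
    rcases h : sh0.all (fun x => x == 0) with _ | _ <;> simp
  | cons p rest ih =>
    obtain ⟨raw, win⟩ := p
    intro prev sh0 b0
    rw [pvDfs]
    simp only [List.map_cons, pvProduct, List.filter_flatMap, List.map_flatMap]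
    refine List.flatMap_congr ?_
    intro s _
    simp only [List.filter_map, List.map_map]
    have hbs : ∀ ss ∈ pvProduct (rest.map (fun q => q.2)),
        (pvZB (rest.map (fun q => q.1)) ss).isEmpty = rest.isEmpty := by
      intro ss hss
      have h1 : ss.length = rest.length := by simpa using pv_prod_len _ _ hss
      rcases rest with _ | ⟨r, rs⟩
      · cases ss with
        | nil => rfl
        | cons a t => simp at h1
      · cases ss with
        | nil => simp at h1
        | cons a t => rfl
    have hneg : ∀ b : Int,
        (match prev with | none => !decide (b < 0) | some p => !decide (p > b))
          = !(match prev with | none => decide (b < 0) | some p => decide (p > b)) := by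
      intro b; cases prev <;> rfl
    rcases hm : (match prev with | none => decide (raw + s < 0) | some p => decide (p > raw + s)) with _ | _
    · -- step check passes
      simp only [hm, Bool.false_eq_true, if_false]
      rcases hr : rest.isEmpty && decide (raw + s > seq_len) with _ | _
      · -- no last-bound prune: recurse
        simp only [Bool.false_eq_true, if_false]
        rw [ih (some (raw + s)) (sh0 ++ [s]) (b0 ++ [raw + s])]
        rw [List.filter_congr (q := fun ss =>
            pvChain seq_len prev (pvZB (raw :: rest.map (fun q => q.1)) (s :: ss)) &&
            !((sh0 ++ s :: ss).all (fun x => x == 0))) ?_]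
        · refine List.map_congr_left ?_
          intro ss _
          simp only [Function.comp_apply]
          rw [show pvZB (raw :: rest.map (fun q => q.1)) (s :: ss)
              = (raw + s) :: pvZB (rest.map (fun q => q.1)) ss from rfl]
          rw [← List.append_cons, ← List.append_cons]
        · intro ss hss
          simp only [Function.comp_apply]
          rw [show pvZB (raw :: rest.map (fun q => q.1)) (s :: ss)
              = (raw + s) :: pvZB (rest.map (fun q => q.1)) ss from rfl]
          rw [pvChain_cons, hneg, hm, hbs ss hss, ← List.append_cons]
          rcases hre : rest.isEmpty with _ | _
          · simp
          · simp only [hre, Bool.true_and] at hr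
            simp [hr]
      · -- last-bound prune: both sides empty
        simp only [if_true]
        symm
        rw [List.filter_eq_nil_iff.mpr ?_]
        · simp
        · intro ss hss
          simp only [Function.comp_apply, Bool.and_eq_true, not_and]
          intro hchain
          rw [show pvZB (raw :: rest.map (fun q => q.1)) (s :: ss)
              = (raw + s) :: pvZB (rest.map (fun q => q.1)) ss from rfl] at hchain
          rw [pvChain_cons, hneg, hm, hbs ss hss] at hchain
          simp only [Bool.and_eq_true] at hr
          simp [hr.1, hr.2] at hchain
    · -- monotonicity / first-bound prune: both sides empty
      simp only [hm, if_true]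
      symm
      rw [List.filter_eq_nil_iff.mpr ?_]
      · simp
      · intro ss hss
        simp only [Function.comp_apply, Bool.and_eq_true, not_and]
        intro hchain
        rw [show pvZB (raw :: rest.map (fun q => q.1)) (s :: ss)
            = (raw + s) :: pvZB (rest.map (fun q => q.1)) ss from rfl] at hchain
        rw [pvChain_cons, hneg, hm] at hchain
        simp at hchain

theorem pv_window_nodup (blocks : List (List (String × Int))) (i : Nat) : (pvWindow blocks i).Nodup := by
  unfold pvWindow
  exact PySem.List.nodup_pyRange_one _ _

theorem pv_candidates_eq (blocks : List (List (String × Int))) (seq_len : Int) (r : Int) (rs : List Int) :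
    ((pvProduct ((List.range (r :: rs).length).map (fun i => pvWindow blocks i))).foldl
        (pvStepA seq_len (r :: rs)) (PySem.Set.add PySem.Set.empty (r :: rs), ([] : List (Int × List Int × List Int)))).2
      = pvDfs seq_len ((r :: rs).zipIdx.map (fun bi => (bi.1, pvWindow blocks bi.2))) none [] [] := by
  have hwlen : ((List.range (r :: rs).length).map (fun i => pvWindow blocks i)).length = (r :: rs).length := by simp
  have hlen : ∀ s ∈ pvProduct ((List.range (r :: rs).length).map (fun i => pvWindow blocks i)),
      s.length = (r :: rs).length := fun s hs => (pv_prod_len _ _ hs).trans hwlen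
  have hnodup : (pvProduct ((List.range (r :: rs).length).map (fun i => pvWindow blocks i))).Nodup := by
    refine pv_prod_nodup _ ?_
    intro w hw2
    simp only [List.mem_map] at hw2
    obtain ⟨i, _, rfl⟩ := hw2
    exact pv_window_nodup blocks i
  have hmap : ((pvProduct ((List.range (r :: rs).length).map (fun i => pvWindow blocks i))).map (pvZB (r :: rs))).Nodup :=
    List.Nodup.map_on (fun x hx y hy hxy => pv_zb_inj (r :: rs) x y (hlen x hx) (hlen y hy) hxy) hnodup
  have h2 : ∀ s ∈ pvProduct ((List.range (r :: rs).length).map (fun i => pvWindow blocks i)),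
      (s.all (fun x => x == 0)) = false → pvZB (r :: rs) s ∉ PySem.Set.add PySem.Set.empty (r :: rs) := by
    intro s hs hz hmem
    rw [show PySem.Set.add PySem.Set.empty (r :: rs) = [r :: rs] from rfl, List.mem_singleton] at hmem
    rw [(pv_zb_eq_self_iff (r :: rs) s (hlen s hs)).mp hmem] at hz
    exact Bool.true_eq_false.mp hz
  have hfil : ((pvProduct ((List.range (r :: rs).length).map (fun i => pvWindow blocks i))).filter
        (fun s => pvChain seq_len none (pvZB (r :: rs) s) && !(s.all (fun x => x == 0))))
      = ((pvProduct ((List.range (r :: rs).length).map (fun i => pvWindow blocks i))).filter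
        (fun s => !(s.all (fun x => x == 0)) && pvOkA seq_len (pvZB (r :: rs) s))) := by
    refine List.filter_congr ?_
    intro s hs
    cases s with
    | nil => exact absurd (hlen [] hs) (by simp)
    | cons a t =>
      rw [show pvZB (r :: rs) (a :: t) = (r + a) :: pvZB rs t from rfl, pv_chain_none, Bool.and_comm]
  rw [pv_foldA_spec seq_len (r :: rs) _ _ _ h2 hmap, pv_dfs_spec, pv_pairs_fst, pv_pairs_snd,
    show List.map (pvWindow blocks) (List.range (r :: rs).length)
      = List.map (fun i => pvWindow blocks i) (List.range (r :: rs).length) from rfl]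
  simp only [List.nil_append]
  rw [hfil]
  rfl

-- ===== VERDICT (by name: the statement is the Claim_ definition above) =====
theorem candidate_boundary_shifts_py_spec : Claim_equal_candidate_boundary_shifts_py := by
  intro blocks raw_bounds seq_len _
  unfold Spec_candidate_boundary_shifts_py
  cases raw_bounds with
  | nil => rfl
  | cons r rs =>
    simp only [candidate_boundary_shifts_py, candidate_boundary_shifts_py_alt]
    rw [pv_candidates_eq blocks seq_len r rs]
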